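-- pv_equiv track=rewrite | github.com/mpat247/TransMAR-GAN | scripts/figure_generation/figure4_multiscale_discriminator.py | compute_output_sizes
-- ===== SOURCE A (Python) =====
-- def compute_output_sizes(input_size, num_layers=5):
--     """
--     Compute the output grid size for SingleScaleDiscriminator.
--
--     Each layer (except last) has stride=2, last has stride=1.
--     Kernel size = 4, padding = 1
--
--     Formula: out = floor((in + 2*pad - kernel) / stride + 1)
--     For stride=2, k=4, p=1: out = floor((in + 2 - 4) / 2 + 1) = floor(in/2)
--     For stride=1, k=4, p=1: out = in - 2
--     """
--     size = input_size
--     for i in range(num_layers):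
--         stride = 1 if i == num_layers - 1 else 2
--         if stride == 2:
--             size = size // 2
--         else:
--             size = size - 2
--     return max(1, size)
-- ===== SOURCE B (Python) =====
-- def compute_output_sizes(input_size, num_layers=5):
--     """Closed form: (num_layers-1) floor-halvings then subtract 2."""
--     if num_layers <= 0:
--         return max(1, input_size)
--     return max(1, input_size // (2 ** (num_layers - 1)) - 2)
-- ===== Notes on version B (the rewrite author's own statement) =====
-- stated objective: faster
-- what changed: Replaces the per-layer loop with a closed form: repeated floor-halving over num_layers-1 stride-2 layers equals floor division by 2**(num_layers-1), followed by the single stride-1 layer's subtract-2.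
import Mathlib
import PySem

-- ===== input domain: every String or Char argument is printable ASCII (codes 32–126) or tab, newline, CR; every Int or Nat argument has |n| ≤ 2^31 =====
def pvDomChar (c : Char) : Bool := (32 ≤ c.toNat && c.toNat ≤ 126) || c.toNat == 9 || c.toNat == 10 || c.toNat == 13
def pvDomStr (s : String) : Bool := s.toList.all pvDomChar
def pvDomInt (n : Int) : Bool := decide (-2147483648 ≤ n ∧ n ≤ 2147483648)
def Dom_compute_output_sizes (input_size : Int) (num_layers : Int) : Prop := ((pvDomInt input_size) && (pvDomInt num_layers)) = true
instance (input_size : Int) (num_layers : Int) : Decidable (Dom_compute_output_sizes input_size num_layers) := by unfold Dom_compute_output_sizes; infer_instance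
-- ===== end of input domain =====

-- B replaces A's per-layer loop with the closed form max(1, input_size // 2^(num_layers-1) - 2); objective: simpler.

-- ===== PORT A =====
def compute_output_sizes (input_size : Int) (num_layers : Int) : Int :=
  let size := (PySem.List.pyRange 0 num_layers 1).foldl
    (fun size i =>
      let stride : Int := if i = num_layers - 1 then 1 else 2
      if stride = 2 then PySem.Int.floordiv size 2 else size - 2)
    input_size
  max 1 size

-- ===== PORT B =====
def compute_output_sizes_alt (input_size : Int) (num_layers : Int) : Int :=
  if num_layers ≤ 0 then max 1 input_size
  else max 1 (PySem.Int.floordiv input_size (2 ^ (num_layers - 1).toNat) - 2)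

-- ===== PRECONDITION & SPEC =====
def Spec_compute_output_sizes (input_size : Int) (num_layers : Int) (out : Int) : Prop := out = compute_output_sizes_alt input_size num_layers
instance (input_size : Int) (num_layers : Int) (out : Int) : Decidable (Spec_compute_output_sizes input_size num_layers out) := by unfold Spec_compute_output_sizes; infer_instance

-- ===== CLAIM (what is proved, stated in full; the proofs are below) =====
def Claim_equal_compute_output_sizes : Prop := ∀ (input_size : Int) (num_layers : Int), Dom_compute_output_sizes input_size num_layers → Spec_compute_output_sizes input_size num_layers (compute_output_sizes input_size num_layers)

-- ===== LEMMAS AND PROOFS =====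

-- repeated floor-halving over a range of length m is floor division by 2^m
theorem foldl_halve (m : Nat) (x : Int) :
    (PySem.List.pyRange 0 (m : Int) 1).foldl (fun s _ => PySem.Int.floordiv s 2) x
      = PySem.Int.floordiv x (2 ^ m) := by
  induction m generalizing x with
  | zero => simp [PySem.Int.floordiv_eq_ediv_of_pos]
  | succ n ih =>
    have h : (((n : Int) + 1)) = (n : Int) + 1 := rfl
    rw [show ((n + 1 : Nat) : Int) = (n : Int) + 1 by push_cast; ring,
        PySem.List.pyRange_one_succ_right (by exact_mod_cast Nat.zero_le n),
        List.foldl_append, ih]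
    simp only [List.foldl]
    rw [PySem.Int.floordiv_eq_ediv_of_pos (by positivity),
        PySem.Int.floordiv_eq_ediv_of_pos (by norm_num),
        PySem.Int.floordiv_eq_ediv_of_pos (by positivity),
        Int.ediv_ediv_of_nonneg (by positivity)]
    ring_nf

theorem loop_closed (n : Nat) (x : Int) :
    (PySem.List.pyRange 0 ((n : Int) + 1) 1).foldl
      (fun size i =>
        let stride : Int := if i = ((n : Int) + 1) - 1 then 1 else 2
        if stride = 2 then PySem.Int.floordiv size 2 else size - 2)
      x
      = PySem.Int.floordiv x (2 ^ n) - 2 := by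
  rw [PySem.List.pyRange_one_succ_right (by exact_mod_cast Nat.zero_le n),
      List.foldl_append]
  have hpref : (PySem.List.pyRange 0 (n : Int) 1).foldl
      (fun size i =>
        let stride : Int := if i = ((n : Int) + 1) - 1 then 1 else 2
        if stride = 2 then PySem.Int.floordiv size 2 else size - 2)
      x = PySem.Int.floordiv x (2 ^ n) := by
    have hcong := PySem.List.foldl_congr_mem
      (l := PySem.List.pyRange 0 (n : Int) 1) (init := x)
      (f := fun size i =>
        let stride : Int := if i = ((n : Int) + 1) - 1 then 1 else 2
        if stride = 2 then PySem.Int.floordiv size 2 else size - 2)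
      (g := fun s _ => PySem.Int.floordiv s 2)
      (by
        intro acc i hi
        have := (PySem.List.mem_pyRange_one).1 hi
        have hne : i ≠ (n : Int) := by omega
        simp [hne])
    rw [hcong, foldl_halve]
  rw [hpref]
  simp

theorem compute_output_sizes_spec_aux (input_size num_layers : Int) :
    compute_output_sizes input_size num_layers = compute_output_sizes_alt input_size num_layers := by
  simp only [compute_output_sizes, compute_output_sizes_alt]
  by_cases h : num_layers ≤ 0
  · rw [if_pos h, PySem.List.pyRange_one]
    have h0 : num_layers.toNat = 0 := by omega
    have h1 : (num_layers - 0).toNat = 0 := by omega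
    simp [h0]
  · rw [if_neg h]
    obtain ⟨n, hn⟩ : ∃ n : Nat, num_layers = (n : Int) + 1 := by
      refine ⟨(num_layers - 1).toNat, by omega⟩
    subst hn
    have ht : ((n : Int) + 1 - 1).toNat = n := by omega
    rw [loop_closed, ht]

-- ===== VERDICT (by name: the statement is the Claim_ definition above) =====
theorem compute_output_sizes_spec : Claim_equal_compute_output_sizes := by
  intro input_size num_layers _
  exact compute_output_sizes_spec_aux input_size num_layers
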